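-- pv_equiv track=rewrite | github.com/MakeevVlad/Pygraph | mypic.py | invert_col
-- ===== SOURCE A (Python) =====
-- def invert_col(col):
--     col = col[1:]
--     res = '#'
--
--     for i in range(3):
--         comp = int(col[2 * i:2 * i + 2], base=16)
--         comp = 255 - comp
--         res += ('0' + hex(comp)[2:])[-2:]
--
--     return res
-- ===== SOURCE B (Python) =====
-- def invert_col(col):
--     n = 65536 * int(col[1:3], 16) + 256 * int(col[3:5], 16) + int(col[5:7], 16)
--     return '#' + format(0xFFFFFF - n, '06x')
-- ===== Notes on version B (the rewrite author's own statement) =====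
-- stated objective: simpler
-- what changed: B combines the three parsed components into one 24-bit number and does a single subtraction from 0xFFFFFF with one zero-padded width-6 hex format call, instead of A's loop that subtracts each component and hand-pads each to two hex digits with a slicing trick.
-- outside the precondition, e.g. on invert_col('#-1-2-3'): A returns '#000102', B returns '#1010202'
import Mathlib
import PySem

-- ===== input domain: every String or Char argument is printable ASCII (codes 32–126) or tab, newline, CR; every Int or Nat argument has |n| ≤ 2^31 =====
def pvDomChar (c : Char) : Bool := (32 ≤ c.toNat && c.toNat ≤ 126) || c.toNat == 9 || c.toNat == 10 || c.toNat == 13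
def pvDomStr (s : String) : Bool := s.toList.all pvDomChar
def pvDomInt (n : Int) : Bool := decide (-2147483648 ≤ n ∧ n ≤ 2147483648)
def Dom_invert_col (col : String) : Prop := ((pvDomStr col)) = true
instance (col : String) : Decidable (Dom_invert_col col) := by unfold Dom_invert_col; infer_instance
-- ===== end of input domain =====

-- B parses the same three two-char slices as A but combines them into one number and
-- formats once, zero-padded to width 6, instead of A's per-component subtract/format/append loop: simpler, same cost.


-- shared hex-formatting helpers (Python's hex()/format(...,'x') digits)
def hexDigitChar (n : Nat) : Char := if n < 10 then Char.ofNat (48 + n) else Char.ofNat (87 + n)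

def hexRep (n : Nat) : List Char :=     -- lowercase hex digits of n, [] for 0
  if h : n = 0 then [] else hexRep (n / 16) ++ [hexDigitChar (n % 16)]
  decreasing_by exact Nat.div_lt_self (Nat.pos_of_ne_zero h) (by omega)

-- hex(n)[2:] ported by hand: exact for n ≥ 0 (inside Pre_ every comp lies in [0, 255])
def pyHexNoPrefix (n : Nat) : List Char := if n = 0 then ['0'] else hexRep n

-- ===== PORT A =====
def invert_col (col : String) : String :=
  let cs := col.toList.drop 1                    -- col = col[1:]
  let res :=                                     -- for i in range(3):
    (List.range 3).foldl (fun res i =>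
      -- comp = int(col[2*i:2*i+2], base=16): nonnegative slice bounds, so the slice is drop/take;
      -- ofCharsBase? = none is Python's ValueError, excluded by Pre_
      let comp : Int := (PySem.Int.ofCharsBase? ((cs.drop (2 * i)).take 2) 16).getD 0
      let comp : Int := 255 - comp               -- comp = 255 - comp
      -- res += ("0" + hex(comp)[2:])[-2:]   (s[-2:] = drop (length - 2); comp ≥ 0 inside Pre_)
      let chunk := '0' :: pyHexNoPrefix comp.toNat
      res ++ chunk.drop (chunk.length - 2)) ['#']
  String.mk res

-- ===== PORT B =====
-- format(m, "06x") ported by hand: hex digits zero-padded to width 6 (exact for m ≥ 0,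
-- which Pre_ guarantees for 0xFFFFFF - n)
def format06x (m : Int) : List Char :=
  let ds := pyHexNoPrefix m.toNat
  List.replicate (6 - ds.length) '0' ++ ds

def invert_col_alt (col : String) : String :=
  -- n = 65536 * int(col[1:3], 16) + 256 * int(col[3:5], 16) + int(col[5:7], 16)
  let n : Int := 65536 * (PySem.Int.ofCharsBase? ((col.toList.drop 1).take 2) 16).getD 0
    + 256 * (PySem.Int.ofCharsBase? ((col.toList.drop 3).take 2) 16).getD 0
    + (PySem.Int.ofCharsBase? ((col.toList.drop 5).take 2) 16).getD 0
  String.mk ('#' :: format06x (16777215 - n))    -- '#' + format(0xFFFFFF - n, "06x")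

-- ===== PRECONDITION & SPEC =====
-- Pre_: each of A's three two-char slices parses under int(., 16) (none = ValueError) and its
-- value is nonnegative, i.e. carries no '-' sign. Pre_ excludes sign-carrying pairs on which A
-- still returns: there A's per-component hex-slicing silently truncates an out-of-range
-- component (e.g. 256 keeps only its low byte) — an artefact of ('0'+hex(comp))[-2:] — while B formats the
-- combined number. The '≤ 255' bounds hold for every two-char parse; they are stated so the
-- proof may use them.
def Pre_invert_col (col : String) : Prop :=
  (0 ≤ (PySem.Int.ofCharsBase? ((col.toList.drop 1).take 2) 16).getD (-1)
    ∧ (PySem.Int.ofCharsBase? ((col.toList.drop 1).take 2) 16).getD (-1) ≤ 255)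
  ∧ (0 ≤ (PySem.Int.ofCharsBase? ((col.toList.drop 3).take 2) 16).getD (-1)
    ∧ (PySem.Int.ofCharsBase? ((col.toList.drop 3).take 2) 16).getD (-1) ≤ 255)
  ∧ (0 ≤ (PySem.Int.ofCharsBase? ((col.toList.drop 5).take 2) 16).getD (-1)
    ∧ (PySem.Int.ofCharsBase? ((col.toList.drop 5).take 2) 16).getD (-1) ≤ 255)
instance (col : String) : Decidable (Pre_invert_col col) := by unfold Pre_invert_col; infer_instance

def pvWitness_invert_col : String := "#00ff07"

def Spec_invert_col (col : String) (out : String) : Prop := out = invert_col_alt col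
instance (col : String) (out : String) : Decidable (Spec_invert_col col out) := by unfold Spec_invert_col; infer_instance

-- ===== CLAIM (what is proved, stated in full; the proofs are below) =====
def Claim_equal_invert_col : Prop :=
  ∀ (col : String), Dom_invert_col col → Pre_invert_col col → Spec_invert_col col (invert_col col)

-- ===== LEMMAS AND PROOFS =====

-- exactly-k-digit hex writer, low digit last
def pad : Nat → Nat → List Char
  | 0, _ => []
  | k + 1, m => pad k (m / 16) ++ [hexDigitChar (m % 16)]

theorem pad_zero (k : Nat) : pad k 0 = List.replicate k '0' := by
  induction k with
  | zero => rfl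
  | succ k ih => rw [List.replicate_succ']; simp [pad, ih]; decide

theorem hexRep_zero : hexRep 0 = [] := by rw [hexRep]; simp

theorem hexRep_pad (k m : Nat) (h : m < 16 ^ k) :
    List.replicate (k - (hexRep m).length) '0' ++ hexRep m = pad k m := by
  induction k generalizing m with
  | zero =>
    interval_cases m
    rw [hexRep]; simp [pad]
  | succ k ih =>
    by_cases h0 : m = 0
    · subst h0; rw [hexRep]; simp [pad_zero]
    · have hm : m / 16 < 16 ^ k := by rw [pow_succ] at h; omega
      rw [hexRep, dif_neg h0, pad, ← ih _ hm]
      simp [List.length_append, Nat.succ_sub_succ, List.append_assoc]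

theorem pad_split (j k m : Nat) : pad (j + k) m = pad j (m / 16 ^ k) ++ pad k (m % 16 ^ k) := by
  induction k generalizing m with
  | zero => simp [pad]
  | succ k ih =>
    show pad (j + k + 1) m = _
    rw [pad, ih, pad, pow_succ']
    rw [Nat.div_div_eq_div_mul, Nat.mod_mod_of_dvd m (dvd_mul_right 16 (16 ^ k)),
      Nat.mod_mul_right_div_self, mul_comm (16 : Nat) (16 ^ k), ← Nat.div_div_eq_div_mul]
    simp [List.append_assoc]

theorem fmt_eq_pad (m : Nat) (h : m < 16 ^ 6) :
    List.replicate (6 - (pyHexNoPrefix m).length) '0' ++ pyHexNoPrefix m = pad 6 m := by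
  by_cases h0 : m = 0
  · subst h0; decide
  · simp only [pyHexNoPrefix, h0, if_false]
    exact hexRep_pad 6 m h

theorem split3 (q1 q2 q3 : Nat) (h1 : q1 < 256) (h2 : q2 < 256) (h3 : q3 < 256) :
    List.replicate (6 - (pyHexNoPrefix (65536 * q1 + 256 * q2 + q3)).length) '0'
        ++ pyHexNoPrefix (65536 * q1 + 256 * q2 + q3)
      = pad 2 q1 ++ (pad 2 q2 ++ pad 2 q3) := by
  have h16 : (16 : Nat) ^ 6 = 16777216 := by norm_num
  rw [fmt_eq_pad _ (by omega)]
  rw [show (6 : Nat) = 2 + 4 from rfl, pad_split, show (4 : Nat) = 2 + 2 from rfl, pad_split,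
    show (16 : Nat) ^ 4 = 65536 from by norm_num, show (16 : Nat) ^ 2 = 256 from by norm_num]
  rw [show (65536 * q1 + 256 * q2 + q3) / 65536 = q1 by omega,
    show (65536 * q1 + 256 * q2 + q3) % 65536 = 256 * q2 + q3 by omega,
    show (256 * q2 + q3) / 256 = q2 by omega, show (256 * q2 + q3) % 256 = q3 by omega]

theorem hexRep_small (q : Nat) (h0 : q ≠ 0) (h1 : q < 16) : hexRep q = [hexDigitChar q] := by
  rw [hexRep, dif_neg h0, show q / 16 = 0 by omega, hexRep_zero, Nat.mod_eq_of_lt h1]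
  rfl

theorem chunk_eq_pad2 (q : Nat) (h : q < 256) :
    List.drop ((pyHexNoPrefix q).length + 1 - 2) ('0' :: pyHexNoPrefix q) = pad 2 q := by
  by_cases h0 : q = 0
  · subst h0; simp [pyHexNoPrefix, pad]; decide
  · by_cases h1 : q < 16
    · rw [show pyHexNoPrefix q = [hexDigitChar q] by
        simp only [pyHexNoPrefix, h0, if_false]; exact hexRep_small q h0 h1]
      simp [pad, show q / 16 = 0 by omega, Nat.mod_eq_of_lt h1]
      decide
    · have hr : hexRep q = [hexDigitChar (q / 16), hexDigitChar (q % 16)] := by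
        rw [hexRep, dif_neg h0, hexRep_small (q / 16) (by omega) (by omega)]
        rfl
      rw [show pyHexNoPrefix q = [hexDigitChar (q / 16), hexDigitChar (q % 16)] by
        simp only [pyHexNoPrefix, h0, if_false]; exact hr]
      simp [pad, show q / 16 % 16 = q / 16 by omega]

-- ===== VERDICT (by name: the statement is the Claim_ definition above) =====
theorem invert_col_spec : Claim_equal_invert_col := by
  intro col _ hpre
  obtain ⟨⟨l1, u1⟩, ⟨l2, u2⟩, ⟨l3, u3⟩⟩ := hpre
  unfold Spec_invert_col invert_col invert_col_alt
  simp only [List.range_succ, List.range_zero, List.nil_append, List.cons_append,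
    List.foldl_cons, List.foldl_nil, mul_zero, mul_one, List.drop_zero, List.drop_drop]
  norm_num
  rw [← List.drop_one (l := col.toList)]
  -- the three parses are identical terms on both sides; name their values
  rcases ho1 : PySem.Int.ofCharsBase? (List.take 2 (List.drop 1 col.toList)) 16 with _ | v1
  · rw [ho1] at l1; simp at l1
  rcases ho2 : PySem.Int.ofCharsBase? (List.take 2 (List.drop 3 col.toList)) 16 with _ | v2
  · rw [ho2] at l2; simp at l2
  rcases ho3 : PySem.Int.ofCharsBase? (List.take 2 (List.drop 5 col.toList)) 16 with _ | v3
  · rw [ho3] at l3; simp at l3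
  rw [ho1] at l1 u1; rw [ho2] at l2 u2; rw [ho3] at l3 u3
  simp only [Option.getD_some] at l1 u1 l2 u2 l3 u3
  simp only [Option.getD_some, format06x]
  have e1 : ((255 : Int) - v1).toNat = 255 - v1.toNat := by omega
  have e2 : ((255 : Int) - v2).toNat = 255 - v2.toNat := by omega
  have e3 : ((255 : Int) - v3).toNat = 255 - v3.toNat := by omega
  have eM : ((16777215 : Int) - (65536 * v1 + 256 * v2 + v3)).toNat
      = 65536 * (255 - v1.toNat) + 256 * (255 - v2.toNat) + (255 - v3.toNat) := by omega
  rw [e1, e2, e3, eM]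
  rw [chunk_eq_pad2 _ (by omega), chunk_eq_pad2 _ (by omega), chunk_eq_pad2 _ (by omega),
    split3 _ _ _ (by omega) (by omega) (by omega)]
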